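-- pv_equiv track=rewrite | github.com/Levintsky/topcoder | python/leetcode/array/1124_well_perform.py | solve
-- ===== SOURCE A (Python) =====
-- def solve(hours):
--     array = [0]
--     memo = {0: -1}
--     best = 0
--     for i, item in enumerate(hours):
--         if item > 8:
--             tmp = array[-1] + 1
--         else:
--             tmp = array[-1] - 1
--         for k in memo:
--             if k < tmp:
--                 best = max(best, i - memo[k])
--         if tmp <= 0 and tmp not in memo:
--             memo[tmp] = i
--         array.append(tmp)
--     return best
-- ===== SOURCE B (Python) =====
-- def solve(hours):
--     # O(n) one-pass: running prefix score; 'first' maps each negative score to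
--     # the earliest index where it appeared; query only score-1.
--     score = 0
--     res = 0
--     first = {}
--     for i, h in enumerate(hours):
--         score += 1 if h > 8 else -1
--         if score > 0:
--             res = i + 1
--         else:
--             if score < 0 and score not in first:
--                 first[score] = i
--             j = first.get(score - 1)
--             if j is not None and i - j > res:
--                 res = i - j
--     return res
-- ===== Notes on version B (the rewrite author's own statement) =====
-- stated objective: faster
-- what changed: Replaced A's rescan of the entire first-occurrence memo dict at every element (O(n^2)) with the standard one-pass prefix-score algorithm that keeps a running score and queries only score-1 in a map of earliest occurrences of negative scores.
import Mathlib
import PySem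

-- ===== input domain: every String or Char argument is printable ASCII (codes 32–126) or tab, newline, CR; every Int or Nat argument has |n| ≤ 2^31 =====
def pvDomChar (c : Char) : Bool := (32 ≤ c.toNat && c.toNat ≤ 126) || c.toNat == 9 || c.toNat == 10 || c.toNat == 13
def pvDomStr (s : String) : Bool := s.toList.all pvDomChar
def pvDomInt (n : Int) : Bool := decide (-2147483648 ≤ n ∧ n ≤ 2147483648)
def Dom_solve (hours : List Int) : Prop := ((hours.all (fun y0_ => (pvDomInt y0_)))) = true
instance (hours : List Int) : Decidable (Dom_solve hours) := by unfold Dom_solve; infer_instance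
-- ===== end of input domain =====

-- B replaces A's rescan of the whole memo dict at every step (O(n^2)) by the
-- one-pass prefix-score solution that looks up only score-1 in a first-occurrence map.

-- ===== PORT A =====
-- array[-1]: `array` starts as [0] and only grows, so it is never empty and the
-- default 0 of pyGetD is never used (exact on all reachable states).
def solveLoopA (hs : List Int) (i : Int) (array : List Int)
    (memo : PySem.Dict Int Int) (best : Int) : Int :=
  match hs with
  | [] => best
  | item :: rest =>
    let tmp := if item > 8 then PySem.List.pyGetD array (-1) 0 + 1
               else PySem.List.pyGetD array (-1) 0 - 1
    let best' := memo.items.foldl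
      (fun b kv => if kv.1 < tmp then max b (i - kv.2) else b) best
    let memo' := if tmp ≤ 0 ∧ memo.contains tmp = false then memo.insert tmp i else memo
    solveLoopA rest (i + 1) (array ++ [tmp]) memo' best'

def solve (hours : List Int) : Int :=
  solveLoopA hours 0 [0] (PySem.Dict.empty.insert 0 (-1)) 0

-- ===== PORT B =====
def solveLoopB (hs : List Int) (i score res : Int) (first : PySem.Dict Int Int) : Int :=
  match hs with
  | [] => res
  | h :: rest =>
    let score' := score + (if h > 8 then 1 else -1)
    if score' > 0 then solveLoopB rest (i + 1) score' (i + 1) first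
    else
      let first' := if score' < 0 ∧ first.contains score' = false
                    then first.insert score' i else first
      let res' := match first'.get? (score' - 1) with
        | some j => if i - j > res then i - j else res
        | none => res
      solveLoopB rest (i + 1) score' res' first'

def solve_alt (hours : List Int) : Int :=
  solveLoopB hours 0 0 0 PySem.Dict.empty

-- ===== PRECONDITION & SPEC =====
def Spec_solve (hours : List Int) (out : Int) : Prop := out = solve_alt hours
instance (hours : List Int) (out : Int) : Decidable (Spec_solve hours out) := by
  unfold Spec_solve; infer_instance

-- ===== CLAIM (what is proved, stated in full; the proofs are below) =====
def Claim_equal_solve : Prop := ∀ (hours : List Int), Dom_solve hours → Spec_solve hours (solve hours)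

-- ===== LEMMAS AND PROOFS =====

-- (key, value) pairs with keys k, k-1, k-2, … over the value list
def pairsOf (k : Int) : List Int → List (Int × Int)
  | [] => []
  | a :: rest => (k, a) :: pairsOf (k - 1) rest

-- A's memo, resp. B's first dict, after the negative scores -1 … -t were first
-- seen at the (strictly increasing) indices `ids`.
def memoOf (ids : List Int) : PySem.Dict Int Int :=
  PySem.Dict.mk ((0, -1) :: pairsOf (-1) ids)

def firstOf (ids : List Int) : PySem.Dict Int Int :=
  PySem.Dict.mk (pairsOf (-1) ids)

theorem pairsOf_append (k : Int) (l1 l2 : List Int) :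
    pairsOf k (l1 ++ l2) = pairsOf k l1 ++ pairsOf (k - l1.length) l2 := by
  induction l1 generalizing k with
  | nil => simp [pairsOf]
  | cons a rest ih =>
    simp only [List.cons_append, pairsOf, ih (k - 1), List.length_cons]
    have harg : k - 1 - (rest.length : Int) = k - ((rest.length + 1 : Nat) : Int) := by
      push_cast; ring
    rw [harg]

theorem mem_pairsOf (k : Int) (l : List Int) (p : Int × Int) (hp : p ∈ pairsOf k l) :
    k - l.length < p.1 ∧ p.1 ≤ k ∧ p.2 ∈ l := by
  induction l generalizing k with
  | nil => simp [pairsOf] at hp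
  | cons a rest ih =>
    simp only [pairsOf, List.mem_cons] at hp
    rcases hp with h | h
    · subst h
      refine ⟨?_, le_refl _, List.mem_cons_self ..⟩
      show k - ((a :: rest).length : Int) < k
      simp only [List.length_cons]
      push_cast
      omega
    · obtain ⟨h1, h2, h3⟩ := ih (k - 1) h
      refine ⟨by simp at h1 ⊢; omega, by omega, by simp [h3]⟩

theorem get?_pairsOf (l : List Int) (k q : Int) :
    (PySem.Dict.mk (pairsOf k l)).get? q =
      if k - l.length < q ∧ q ≤ k then l[(k - q).toNat]? else none := by
  induction l generalizing k with
  | nil =>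
    simp only [pairsOf, List.length_nil, Nat.cast_zero]
    rw [if_neg (by omega)]
    rfl
  | cons a rest ih =>
    simp only [pairsOf, PySem.Dict.get?_mk_cons, ih (k - 1), List.length_cons]
    by_cases hk : k = q
    · subst hk
      rw [if_pos (by simp), if_pos (by constructor <;> [push_cast; skip] <;> omega)]
      have h0 : (k - k).toNat = 0 := by omega
      rw [h0]
      rfl
    · have hbeq : (k == q) = false := by simp [hk]
      rw [hbeq]
      simp only [Bool.false_eq_true, if_false]
      by_cases hc : k - 1 - (rest.length : Int) < q ∧ q ≤ k - 1
      · rw [if_pos hc, if_pos (by push_cast; omega)]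
        have h1 : (k - q).toNat = (k - 1 - q).toNat + 1 := by omega
        simp [h1]
      · rw [if_neg hc, if_neg (by push_cast at hc ⊢; omega)]

-- the scan skips every pair whose (i - value) is already ≤ the accumulator
theorem fold_absorb (i tmp : Int) (ps : List (Int × Int)) (acc : Int)
    (h : ∀ p ∈ ps, i - p.2 ≤ acc) :
    ps.foldl (fun b kv => if kv.1 < tmp then max b (i - kv.2) else b) acc = acc := by
  induction ps with
  | nil => rfl
  | cons p rest ih =>
    simp only [List.foldl_cons]
    have hp := h p (by simp)
    have hstep : (if p.1 < tmp then max acc (i - p.2) else acc) = acc := by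
      split_ifs with h1
      · omega
      · rfl
    rw [hstep]
    exact ih (fun q hq => h q (by simp [hq]))

-- the scan skips every pair whose key is ≥ tmp
theorem fold_skip (i tmp : Int) (ps : List (Int × Int)) (acc : Int)
    (h : ∀ p ∈ ps, ¬ p.1 < tmp) :
    ps.foldl (fun b kv => if kv.1 < tmp then max b (i - kv.2) else b) acc = acc := by
  induction ps with
  | nil => rfl
  | cons p rest ih =>
    simp only [List.foldl_cons]
    rw [if_neg (h p (by simp))]
    exact ih (fun q hq => h q (by simp [hq]))

-- ===== the main loop invariant =====
theorem loop_eq (hs : List Int) (i score best : Int) (array ids : List Int)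
    (harr : PySem.List.pyGetD array (-1) 0 = score)
    (hpw : List.Pairwise (· < ·) ((-1) :: ids))
    (hlt : ∀ a ∈ ids, a < i) (hi : 0 ≤ i)
    (hscore : -(ids.length : Int) ≤ score) (hbest : best ≤ i) :
    solveLoopA hs i array (memoOf ids) best = solveLoopB hs i score best (firstOf ids) := by
  induction hs generalizing i score best array ids with
  | nil => rfl
  | cons item rest ih =>
    simp only [solveLoopA, solveLoopB, harr]
    set tmp : Int := if item > 8 then score + 1 else score - 1 with htmp
    have hscoreB : score + (if item > 8 then (1:Int) else -1) = tmp := by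
      rw [htmp]; split_ifs <;> ring
    rw [hscoreB]
    have htmp_range : score - 1 ≤ tmp ∧ tmp ≤ score + 1 := by
      constructor <;> (rw [htmp]; split_ifs <;> omega)
    have hids_nonneg : ∀ a ∈ ids, 0 ≤ a := by
      intro a ha
      have := (List.pairwise_cons.mp hpw).1 a ha
      omega
    have hids_pw : List.Pairwise (· < ·) ids := (List.pairwise_cons.mp hpw).2
    have harr' : PySem.List.pyGetD (array ++ [tmp]) (-1) 0 = tmp :=
      PySem.List.pyGetD_neg_one_append_singleton ..
    have hitems : (memoOf ids).items = (0, -1) :: pairsOf (-1) ids := rfl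
    set t : Int := (ids.length : Int) with ht
    have hget_first : ∀ (l : List Int) (q : Int),
        (firstOf l).get? q =
          if -1 - (l.length : Int) < q ∧ q ≤ -1 then l[(-1 - q).toNat]? else none := by
      intro l q
      exact get?_pairsOf l (-1) q
    by_cases hpos : 0 < tmp
    · -- tmp > 0 : A's scan yields max best (i+1) = i+1; no insertion on either side
      rw [if_pos hpos]
      have hfold : ((memoOf ids).items.foldl
          (fun b kv => if kv.1 < tmp then max b (i - kv.2) else b) best) = i + 1 := by
        rw [hitems]
        simp only [List.foldl_cons, if_pos hpos]
        have h1 : max best (i - (-1)) = i + 1 := by omega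
        rw [h1]
        exact fold_absorb i tmp _ _ (fun p hp => by
          have h2 := (mem_pairsOf _ _ _ hp).2.2
          have := hids_nonneg _ h2
          omega)
      rw [hfold]
      rw [if_neg (by rintro ⟨h1, _⟩; omega)]
      exact ih (i + 1) tmp (i + 1) (array ++ [tmp]) ids harr' hpw
        (fun a ha => by have := hlt a ha; omega) (by omega) (by omega) (by omega)
    · -- tmp ≤ 0
      rw [if_neg hpos]
      have hmemo_contains : (memoOf ids).contains tmp = decide (-tmp ≤ t) := by
        rw [PySem.Dict.contains_eq_isSome_get?]
        show ((PySem.Dict.mk ((0, -1) :: pairsOf (-1) ids)).get? tmp).isSome = _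
        rw [PySem.Dict.get?_mk_cons]
        by_cases h0 : tmp = 0
        · rw [h0]
          have hle : (0:Int) ≤ t := by omega
          simp [hle]
        · have hb : ((0:Int) == tmp) = false := by simp [Ne.symm h0]
          rw [hb]
          simp only [Bool.false_eq_true, if_false]
          rw [get?_pairsOf]
          by_cases hc : -1 - (ids.length : Int) < tmp ∧ tmp ≤ -1
          · rw [if_pos hc]
            have hlen : (-1 - tmp).toNat < ids.length := by omega
            rw [List.getElem?_eq_getElem hlen]
            have hle : -tmp ≤ t := by omega
            simp [hle]
          · rw [if_neg hc]
            have hle : ¬ -tmp ≤ t := by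
              push_cast at hc
              omega
            simp [hle]
      by_cases hseen : -tmp ≤ t
      · -- tmp already recorded : no insertion on either side
        rw [if_neg (by rintro ⟨_, h2⟩; rw [hmemo_contains] at h2; simp at h2; omega)]
        have hB_noins : ¬ (tmp < 0 ∧ (firstOf ids).contains tmp = false) := by
          rintro ⟨h1, h2⟩
          rw [PySem.Dict.contains_eq_isSome_get?, hget_first] at h2
          rw [if_pos (by constructor <;> omega)] at h2
          have hlen : (-1 - tmp).toNat < ids.length := by omega
          rw [List.getElem?_eq_getElem hlen] at h2
          simp at h2
        rw [if_neg hB_noins]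
        set u : ℕ := (-tmp).toNat with hu
        -- A's scan = if u < len then max best (i - ids[u]) else best
        have hfoldA : ((memoOf ids).items.foldl
            (fun b kv => if kv.1 < tmp then max b (i - kv.2) else b) best) =
            (if h : u < ids.length then max best (i - ids[u]) else best) := by
          rw [hitems]
          simp only [List.foldl_cons]
          rw [if_neg (by omega)]
          conv_lhs => rw [← List.take_append_drop u ids, pairsOf_append, List.foldl_append]
          have hlen_take : ((ids.take u).length : Int) = min (u : Int) t := by
            simp only [List.length_take]
            push_cast
            omega
          rw [fold_skip i tmp _ best (fun p hp => by
            have h2 := (mem_pairsOf _ _ _ hp).1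
            rw [hlen_take] at h2
            omega)]
          by_cases h : u < ids.length
          · rw [dif_pos h]
            have hdrop : ids.drop u = ids[u] :: ids.drop (u + 1) := List.drop_eq_getElem_cons h
            rw [hdrop]
            simp only [pairsOf, List.foldl_cons]
            rw [if_pos (by rw [hlen_take]; omega)]
            refine fold_absorb i tmp _ _ (fun p hp => ?_)
            have h3 := (mem_pairsOf _ _ _ hp).2.2
            -- every later id is larger than ids[u]
            have hgt : ids[u] < p.2 := by
              have hpw2 : List.Pairwise (· < ·) (ids.drop u) := hids_pw.drop
              rw [hdrop] at hpw2
              exact (List.pairwise_cons.mp hpw2).1 p.2 h3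
            omega
          · rw [dif_neg h]
            have hdrop : ids.drop u = [] := List.drop_eq_nil_of_le (by omega)
            rw [hdrop]
            rfl
        rw [hfoldA]
        -- B's lookup
        have hlook : (firstOf ids).get? (tmp - 1) =
            (if h : u < ids.length then some ids[u] else none) := by
          rw [hget_first]
          by_cases h : u < ids.length
          · rw [if_pos (by constructor <;> omega), dif_pos h]
            have hidx : (-1 - (tmp - 1)).toNat = u := by omega
            rw [hidx, List.getElem?_eq_getElem h]
          · rw [if_neg (by intro hc; omega), dif_neg h]
        rw [hlook]
        by_cases h : u < ids.length
        · rw [dif_pos h, dif_pos h]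
          show solveLoopA rest (i + 1) (array ++ [tmp]) (memoOf ids) (max best (i - ids[u])) =
            solveLoopB rest (i + 1) tmp (if i - ids[u] > best then i - ids[u] else best)
              (firstOf ids)
          have hval : (if i - ids[u] > best then i - ids[u] else best) = max best (i - ids[u]) := by
            split_ifs <;> omega
          rw [hval]
          have hidnn := hids_nonneg _ (ids.getElem_mem h)
          exact ih (i + 1) tmp (max best (i - ids[u])) (array ++ [tmp]) ids harr' hpw
            (fun a ha => by have := hlt a ha; omega) (by omega) (by omega) (by omega)
        · rw [dif_neg h, dif_neg h]
          show solveLoopA rest (i + 1) (array ++ [tmp]) (memoOf ids) best =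
            solveLoopB rest (i + 1) tmp best (firstOf ids)
          exact ih (i + 1) tmp best (array ++ [tmp]) ids harr' hpw
            (fun a ha => by have := hlt a ha; omega) (by omega) (by omega) (by omega)
      · -- first time this (negative) score is reached : both sides insert
        have htmp_eq : tmp = -(t + 1) := by omega
        have htneg : tmp < 0 := by omega
        rw [if_pos ⟨by omega, by rw [hmemo_contains]; simp; omega⟩]
        have hB_contains : (firstOf ids).contains tmp = false := by
          rw [PySem.Dict.contains_eq_isSome_get?, hget_first]
          rw [if_neg (by rintro ⟨h1, _⟩; omega)]
          rfl
        rw [if_pos ⟨htneg, hB_contains⟩]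
        -- both inserts append the fresh key tmp = -(t+1)
        have hAins : (memoOf ids).insert tmp i = memoOf (ids ++ [i]) := by
          apply PySem.Dict.ext
          rw [PySem.Dict.items_insert_of_not_contains _ _ (by rw [hmemo_contains]; simp; omega)]
          show ((0, -1) :: pairsOf (-1) ids) ++ [(tmp, i)] = (0, -1) :: pairsOf (-1) (ids ++ [i])
          rw [pairsOf_append]
          simp only [pairsOf, List.cons_append]
          rw [htmp_eq, ht]
          norm_num
          omega
        have hBins : (firstOf ids).insert tmp i = firstOf (ids ++ [i]) := by
          apply PySem.Dict.ext
          rw [PySem.Dict.items_insert_of_not_contains _ _ hB_contains]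
          show pairsOf (-1) ids ++ [(tmp, i)] = pairsOf (-1) (ids ++ [i])
          rw [pairsOf_append]
          simp only [pairsOf]
          rw [htmp_eq, ht]
          norm_num
          omega
        rw [hAins, hBins]
        -- A's scan finds no key < tmp
        have hfoldA : ((memoOf ids).items.foldl
            (fun b kv => if kv.1 < tmp then max b (i - kv.2) else b) best) = best := by
          rw [hitems]
          simp only [List.foldl_cons]
          rw [if_neg (by omega)]
          exact fold_skip i tmp _ best (fun p hp => by
            have h2 := (mem_pairsOf _ _ _ hp).1
            omega)
        rw [hfoldA]
        -- B finds no score-1 entry either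
        have hlook : (firstOf (ids ++ [i])).get? (tmp - 1) = none := by
          rw [hget_first]
          rw [if_neg (by rintro ⟨h1, _⟩; simp at h1; omega)]
        rw [hlook]
        have hpw' : List.Pairwise (· < ·) ((-1) :: (ids ++ [i])) := by
          rw [List.pairwise_cons] at hpw ⊢
          constructor
          · intro a ha
            rcases List.mem_append.mp ha with h | h
            · exact hpw.1 a h
            · simp at h; omega
          · rw [List.pairwise_append]
            refine ⟨hpw.2, List.pairwise_singleton _ _, ?_⟩
            intro a ha b hb
            simp at hb
            subst hb
            exact hlt a ha
        exact ih (i + 1) tmp best (array ++ [tmp]) (ids ++ [i]) harr' hpw'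
          (fun a ha => by rcases List.mem_append.mp ha with h | h
                          · have := hlt a h; omega
                          · simp at h; omega) (by omega)
          (by simp only [List.length_append, List.length_cons, List.length_nil]; omega)
          (by omega)

-- ===== VERDICT (by name: the statement is the Claim_ definition above) =====
theorem solve_spec : Claim_equal_solve := by
  intro hours _
  unfold Spec_solve solve solve_alt
  have h1 : (PySem.Dict.empty.insert 0 (-1) : PySem.Dict Int Int) = memoOf [] := by decide
  have h2 : (PySem.Dict.empty : PySem.Dict Int Int) = firstOf [] := by decide
  rw [h1, h2]
  exact loop_eq hours 0 0 0 [0] [] (by decide) (by simp) (by simp) le_rfl (by simp) le_rfl
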